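-- pv_equiv track=rewrite | github.com/name2345678/FinalPython | Main.py | str_to_short_word_set
-- ===== SOURCE A (Python) =====
-- MAX_WORD_LEN = 5
--
-- MIN_WORD_LEN = 3
--
-- def isalpha_eng(s: str) -> bool:
--     s = s.upper()
--     for c in s:
--         if not 'A' <= c <= 'Z':
--             return False
--     return True
--
-- def str_to_short_word_set(s: str) -> set:
--     word_set = set()
--     s_index = 0
--     word = ''
--     s = s + ' '  # So the logic works if the story ends in a letter
--     while s_index < len(s):
--         # count if word is under 5
--         if len(word) < MAX_WORD_LEN and isalpha_eng(s[s_index]):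
--             word = word + s[s_index]
--         # if over discard it and continue in string until seperator
--         elif len(word) >= MAX_WORD_LEN and isalpha_eng(s[s_index]):
--             word = ''
--             while s_index < len(s) and isalpha_eng(s[s_index]): s_index += 1
--         # if we got to seperator and word wasn't discarded (meaning it's valid) add it to set
--         elif not isalpha_eng(s[s_index]) and word:
--             # if word is 3-5 in length add it to set
--             if len(word) >= MIN_WORD_LEN:
--                 word_set.add(word.upper())
--             word = ''
--         # continue string index
--         s_index += 1
--     return word_set
-- ===== SOURCE B (Python) =====
-- def str_to_short_word_set(s: str) -> set:
--     cleaned = ''.join(c if ('A' <= c <= 'Z' or 'a' <= c <= 'z') else ' ' for c in s)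
--     return {w.upper() for w in cleaned.split() if 3 <= len(w) <= 5}
-- ===== Notes on version B (the rewrite author's own statement) =====
-- stated objective: idiomatic
-- what changed: Replaces A's index-based scan with its word accumulator and discard-long-word inner skip loop by the idiomatic tokenize-then-filter: map every non-ASCII-letter character to a space, split on whitespace, and keep the uppercased words of length 3-5 in a set comprehension.
import Mathlib
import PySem

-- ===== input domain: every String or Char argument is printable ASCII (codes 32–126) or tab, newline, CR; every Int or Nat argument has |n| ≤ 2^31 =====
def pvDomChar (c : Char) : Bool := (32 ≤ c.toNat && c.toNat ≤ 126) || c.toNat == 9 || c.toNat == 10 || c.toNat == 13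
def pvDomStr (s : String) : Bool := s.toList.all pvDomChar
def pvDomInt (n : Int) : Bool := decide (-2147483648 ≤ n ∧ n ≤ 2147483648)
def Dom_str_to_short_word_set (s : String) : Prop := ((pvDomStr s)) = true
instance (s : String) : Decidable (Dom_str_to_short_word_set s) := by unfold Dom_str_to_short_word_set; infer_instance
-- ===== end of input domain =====

-- B replaces A's manual index scan (with its discard-long-word inner loop) by the idiomatic
-- map-non-letters-to-space / split on whitespace / length-filtered set comprehension.

-- ===== PORT A =====

-- isalpha_eng(s): upper-case s, then check every character is in 'A'..'Z'
def isalphaEng (cs : List Char) : Bool :=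
  (PySem.Chars.upper cs).all (fun c => decide ('A' ≤ c) && decide (c ≤ 'Z'))

-- the inner `while s_index < len(s) and isalpha_eng(s[s_index]): s_index += 1`
def skipAlphaA : List Char → List Char
  | [] => []
  | c :: rest => if isalphaEng [c] then skipAlphaA rest else c :: rest

theorem skipAlphaA_length_le (l : List Char) : (skipAlphaA l).length ≤ l.length := by
  induction l with
  | nil => simp [skipAlphaA]
  | cons c rest ih =>
      simp only [skipAlphaA]
      split
      · exact Nat.le_succ_of_le ih
      · exact Nat.le_refl _

-- the outer `while s_index < len(s)` loop of A, as structural recursion over the remaining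
-- characters with the same state (word, word_set); A's access to s is strictly sequential.
def loopA : List Char → List Char → PySem.Set String → PySem.Set String
  | [], _, ws => ws
  | c :: rest, word, ws =>
      if word.length < 5 && isalphaEng [c] then
        loopA rest (word ++ [c]) ws
      else if 5 ≤ word.length && isalphaEng [c] then
        -- discard, inner skip loop, then the outer `s_index += 1`
        loopA ((skipAlphaA (c :: rest)).drop 1) [] ws
      else if !isalphaEng [c] && !word.isEmpty then
        loopA rest [] (if 3 ≤ word.length then PySem.Set.add ws (String.ofList (PySem.Chars.upper word)) else ws)
      else
        loopA rest word ws
  termination_by l _ _ => l.length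
  decreasing_by
    · simp
    · have h := skipAlphaA_length_le (c :: rest)
      have h2 : ((skipAlphaA (c :: rest)).drop 1).length ≤ (skipAlphaA (c :: rest)).length - 1 := by
        simp
      simp only [List.length_cons] at *
      omega
    · simp
    · simp

def str_to_short_word_set (s : String) : List String :=
  loopA (s.toList ++ [' ']) [] PySem.Set.empty

-- ===== PORT B =====

-- B's letter test: 'A' <= c <= 'Z' or 'a' <= c <= 'z'
def isLetterB (c : Char) : Bool :=
  (decide ('A' ≤ c) && decide (c ≤ 'Z')) || (decide ('a' ≤ c) && decide (c ≤ 'z'))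

def str_to_short_word_set_alt (s : String) : List String :=
  let cleaned := s.toList.map (fun c => if isLetterB c then c else ' ')
  (PySem.Chars.split₀ cleaned).foldl
    (fun ws w =>
      if 3 ≤ w.length && w.length ≤ 5 then PySem.Set.add ws (String.ofList (PySem.Chars.upper w)) else ws)
    PySem.Set.empty

-- ===== PRECONDITION & SPEC =====
def Spec_str_to_short_word_set (s : String) (out : List String) : Prop := out = str_to_short_word_set_alt s
instance (s : String) (out : List String) : Decidable (Spec_str_to_short_word_set s out) := by unfold Spec_str_to_short_word_set; infer_instance

-- ===== CLAIM (what is proved, stated in full; the proofs are below) =====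
def Claim_equal_str_to_short_word_set : Prop := ∀ (s : String), Dom_str_to_short_word_set s → Spec_str_to_short_word_set s (str_to_short_word_set s)

-- ===== LEMMAS AND PROOFS =====

theorem charLe (a b : Char) : (a ≤ b) ↔ (a.toNat ≤ b.toNat) := Iff.rfl

-- A's per-character letter test agrees with B's (PySem.Chars.islower is the ASCII test)
theorem isalphaEng_single (c : Char) : isalphaEng [c] = isLetterB c := by
  simp only [isalphaEng, isLetterB, PySem.Chars.upper, List.map, List.all_cons, List.all_nil,
    PySem.Chars.upperChar, PySem.Chars.islower, Bool.and_true]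
  split_ifs with h
  · simp only [Bool.and_eq_true, decide_eq_true_eq] at h
    rw [charLe, charLe] at h
    have hA : (Char.toNat 'a') = 97 := rfl
    have hz : (Char.toNat 'z') = 122 := rfl
    rw [hA] at h; rw [hz] at h
    have hv : ((Char.ofNat (c.toNat - 32)).toNat) = c.toNat - 32 := by
      rw [Char.toNat_ofNat]
      have : Nat.isValidChar (c.toNat - 32) := Or.inl (by omega)
      simp [this]
    show (decide ((Char.toNat 'A') ≤ (Char.ofNat (c.toNat - 32)).toNat)
        && decide ((Char.ofNat (c.toNat - 32)).toNat ≤ (Char.toNat 'Z'))) = _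
    have h65 : (Char.toNat 'A') = 65 := rfl
    have h90 : (Char.toNat 'Z') = 90 := rfl
    simp only [h65, h90, hA, hz, hv, charLe]
    have d1 : (65 ≤ c.toNat - 32) = True := by simp; omega
    have d2 : (c.toNat - 32 ≤ 90) = True := by simp; omega
    have d3 : (97 ≤ c.toNat) = True := by simp; omega
    have d4 : (c.toNat ≤ 122) = True := by simp; omega
    simp [d1, d2, d3, d4]
  · simp only [Bool.and_eq_true, decide_eq_true_eq, not_and] at h
    have hfalse : (decide ('a' ≤ c) && decide (c ≤ 'z')) = false := by
      by_cases h2 : 'a' ≤ c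
      · simp [h h2]
      · simp [h2]
    rw [hfalse, Bool.or_false]

theorem letter_not_space (c : Char) (h : isLetterB c = true) : PySem.Chars.isspace c = false := by
  simp only [isLetterB, Bool.or_eq_true, Bool.and_eq_true, decide_eq_true_eq, charLe] at h
  have hA : (Char.toNat 'A') = 65 := rfl
  have hZ : (Char.toNat 'Z') = 90 := rfl
  have ha : (Char.toNat 'a') = 97 := rfl
  have hz : (Char.toNat 'z') = 122 := rfl
  rw [hA, hZ, ha, hz] at h
  simp only [PySem.Chars.isspace]
  simp only [Bool.or_eq_false_iff, Bool.and_eq_false_iff, decide_eq_false_iff_not, not_le]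
  omega

-- step function of B's fold
def stepF (ws : PySem.Set String) (w : List Char) : PySem.Set String :=
  if 3 ≤ w.length && w.length ≤ 5 then PySem.Set.add ws (String.ofList (PySem.Chars.upper w)) else ws

-- non-letter chars map to ' '; the cleaned list B splits
def cleanB (l : List Char) : List Char := l.map (fun c => if isLetterB c then c else ' ')

-- maximal letter runs of a char list
def runsOf : List Char → List (List Char)
  | [] => []
  | c :: rest =>
      if isLetterB c then (c :: rest.takeWhile isLetterB) :: runsOf (rest.dropWhile isLetterB)
      else runsOf rest
  termination_by l => l.length
  decreasing_by
    · have := List.length_dropWhile_le isLetterB rest; simp; omega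
    · simp

theorem cleanB_of_letters (w : List Char) (h : ∀ c ∈ w, isLetterB c = true) : cleanB w = w := by
  induction w with
  | nil => rfl
  | cons c t ih =>
      simp only [cleanB, List.map] at *
      rw [h c (by simp), ih (fun c hc => h c (by simp [hc]))]
      simp

theorem go_letters (r : List Char) : ∀ (rest cur : List Char) (acc : List (List Char)),
    (∀ c ∈ r, isLetterB c = true) →
    PySem.Chars.split₀.go (r ++ rest) cur acc = PySem.Chars.split₀.go rest (r.reverse ++ cur) acc := by
  induction r with
  | nil => intro rest cur acc _; simp
  | cons c r' ih =>
      intro rest cur acc h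
      have hsp : PySem.Chars.isspace c = false := letter_not_space c (h c (by simp))
      show PySem.Chars.split₀.go (c :: (r' ++ rest)) cur acc = _
      rw [PySem.Chars.split₀.go]
      simp only [hsp, Bool.false_eq_true, if_false]
      rw [ih rest (c :: cur) acc (fun x hx => h x (by simp [hx]))]
      simp

theorem skipAlphaA_letters (r : List Char) : ∀ (d : Char) (rest : List Char),
    (∀ c ∈ r, isLetterB c = true) → isLetterB d = false →
    skipAlphaA (r ++ d :: rest) = d :: rest := by
  induction r with
  | nil =>
      intro d rest _ hd
      simp [skipAlphaA, isalphaEng_single, hd]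
  | cons c r' ih =>
      intro d rest h hd
      show skipAlphaA (c :: (r' ++ d :: rest)) = _
      rw [skipAlphaA]
      rw [isalphaEng_single, h c (by simp), if_pos rfl]
      exact ih d rest (fun x hx => h x (by simp [hx])) hd

theorem dropWhile_head_false {p : Char → Bool} {l : List Char} {d : Char} {t : List Char}
    (h : l.dropWhile p = d :: t) : p d = false := by
  have := List.head?_dropWhile_not p l
  rw [h] at this
  simpa using this

-- consuming one whole maximal run in A's loop
theorem run_lemma (r : List Char) : ∀ (acc : List Char) (d : Char) (rest' : List Char) (ws : PySem.Set String),
    (∀ c ∈ r, isLetterB c = true) → isLetterB d = false → acc.length ≤ 5 →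
    loopA (r ++ d :: rest') acc ws = loopA rest' [] (stepF ws (acc ++ r)) := by
  induction r with
  | nil =>
      intro acc d rest' ws _ hd hle
      show loopA (d :: rest') acc ws = _
      rw [loopA, isalphaEng_single, hd]
      by_cases hacc : acc = []
      · subst hacc
        simp [stepF]
      · have he : acc.isEmpty = false := by simpa [List.isEmpty_iff] using hacc
        simp only [he, Bool.and_false, Bool.false_eq_true, if_false, Bool.not_false,
          Bool.and_self, if_true, List.append_nil, stepF]
        congr 1
        by_cases h3 : 3 ≤ acc.length
        · rw [if_pos (by simpa using h3), if_pos (by simp; omega)]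
        · rw [if_neg (by simpa using h3), if_neg (by simp; omega)]
  | cons c r' ih =>
      intro acc d rest' ws h hd hle
      have hc : isLetterB c = true := h c (by simp)
      show loopA (c :: (r' ++ d :: rest')) acc ws = _
      rw [loopA]
      rw [isalphaEng_single, hc]
      by_cases h5 : acc.length < 5
      · rw [if_pos (by simp [h5])]
        rw [ih (acc ++ [c]) d rest' ws (fun x hx => h x (by simp [hx])) hd (by simp; omega)]
        simp
      · rw [if_neg (by simp [h5]), if_pos (by simp; omega)]
        have hskip : skipAlphaA (c :: (r' ++ d :: rest')) = d :: rest' := by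
          have : (c :: r') ++ d :: rest' = c :: (r' ++ d :: rest') := by simp
          rw [← this]
          exact skipAlphaA_letters (c :: r') d rest' h hd
        rw [hskip]
        simp only [List.drop_succ_cons, List.drop_zero]
        have : stepF ws (acc ++ c :: r') = ws := by
          unfold stepF
          rw [if_neg]
          simp; omega
        rw [this]

-- A's loop over `l ++ [' ']` folds B's step over the maximal runs of l
theorem main_loopA (n : Nat) : ∀ (l : List Char) (ws : PySem.Set String), l.length ≤ n →
    loopA (l ++ [' ']) [] ws = (runsOf l).foldl stepF ws := by
  induction n with
  | zero =>
      intro l ws hl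
      have : l = [] := by cases l <;> simp_all
      subst this
      show loopA [' '] [] ws = _
      rw [loopA]
      norm_num [isalphaEng, PySem.Chars.upper, PySem.Chars.upperChar, PySem.Chars.islower, loopA, runsOf]
  | succ m ih =>
      intro l ws hl
      cases l with
      | nil =>
          show loopA [' '] [] ws = _
          rw [loopA]
          norm_num [isalphaEng, PySem.Chars.upper, PySem.Chars.upperChar, PySem.Chars.islower, loopA, runsOf]
      | cons c t =>
          by_cases hc : isLetterB c = true
          · -- a run starts here
            have hsplit : (c :: t) ++ [' '] =
                (c :: t.takeWhile isLetterB) ++ (t.dropWhile isLetterB ++ [' ']) := by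
              simp only [List.cons_append, ← List.append_assoc, List.takeWhile_append_dropWhile]
            rw [hsplit]
            have hrun : ∀ x ∈ c :: t.takeWhile isLetterB, isLetterB x = true := by
              intro x hx
              rcases List.mem_cons.1 hx with h1 | h2
              · simpa [h1] using hc
              · exact List.mem_takeWhile_imp h2
            cases hdw : t.dropWhile isLetterB with
            | nil =>
                have h0 : c :: List.takeWhile isLetterB t ++ ([] ++ [' ']) =
                    (c :: List.takeWhile isLetterB t) ++ (' ' :: ([] : List Char)) := by simp
                rw [h0, run_lemma _ [] ' ' [] ws hrun (by decide) (by simp)]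
                show loopA [] [] _ = _
                rw [loopA, runsOf]
                simp [hc, hdw, runsOf]
            | cons d t'' =>
                have hd : isLetterB d = false := dropWhile_head_false hdw
                have h0 : c :: List.takeWhile isLetterB t ++ (d :: t'' ++ [' ']) =
                    (c :: List.takeWhile isLetterB t) ++ (d :: (t'' ++ [' '])) := by simp
                rw [h0, run_lemma _ [] d (t'' ++ [' ']) ws hrun hd (by simp)]
                have hlen : t''.length ≤ m := by
                  have h1 := List.length_dropWhile_le isLetterB t
                  rw [hdw] at h1
                  simp at h1 hl
                  omega
                rw [ih t'' _ hlen]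
                rw [runsOf]
                simp only [hc]
                rw [hdw, runsOf]
                simp [hd]
          · -- separator with empty word: plain skip
            have hc' : isLetterB c = false := by simpa using hc
            show loopA (c :: (t ++ [' '])) [] ws = _
            rw [loopA]
            rw [isalphaEng_single, hc']
            simp only [Bool.and_false, Bool.false_eq_true, if_false, List.isEmpty_nil,
              Bool.not_true, Bool.and_false, Bool.not_false]
            rw [ih t ws (by simp at hl; omega)]
            rw [runsOf]
            simp [hc']

-- B's fold over split₀(cleaned) is the fold over the maximal runs
theorem go_clean (n : Nat) : ∀ (l : List Char) (acc : List (List Char)), l.length ≤ n →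
    PySem.Chars.split₀.go (cleanB l) [] acc = acc.reverse ++ runsOf l := by
  induction n with
  | zero =>
      intro l acc hl
      have : l = [] := by cases l <;> simp_all
      subst this
      simp [cleanB, runsOf, PySem.Chars.split₀.go]
  | succ m ih =>
      intro l acc hl
      cases l with
      | nil =>
          simp [cleanB, runsOf, PySem.Chars.split₀.go]
      | cons c t =>
          by_cases hc : isLetterB c = true
          · have hsplit : cleanB (c :: t) =
                (c :: t.takeWhile isLetterB) ++ cleanB (t.dropWhile isLetterB) := by
              have h1 : cleanB (c :: t) = cleanB ((c :: t.takeWhile isLetterB) ++ t.dropWhile isLetterB) := by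
                simp [List.takeWhile_append_dropWhile]
              rw [h1]
              simp only [cleanB, List.map_append]
              congr 1
              exact cleanB_of_letters _ (by
                intro x hx
                rcases List.mem_cons.1 hx with h1 | h2
                · simpa [h1] using hc
                · exact List.mem_takeWhile_imp h2)
            rw [hsplit]
            rw [go_letters _ _ [] acc (by
              intro x hx
              rcases List.mem_cons.1 hx with h1 | h2
              · simpa [h1] using hc
              · exact List.mem_takeWhile_imp h2)]
            rw [runsOf]
            simp only [hc, if_true]
            cases hdw : t.dropWhile isLetterB with
            | nil =>
                simp [cleanB, PySem.Chars.split₀.go, runsOf]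
            | cons d t'' =>
                have hd : isLetterB d = false := dropWhile_head_false hdw
                have hcl : cleanB (d :: t'') = ' ' :: cleanB t'' := by simp [cleanB, hd]
                rw [hcl]
                rw [PySem.Chars.split₀.go]
                have hsp : PySem.Chars.isspace ' ' = true := by decide
                rw [hsp]
                have hlen : t''.length ≤ m := by
                  have h1 := List.length_dropWhile_le isLetterB t
                  rw [hdw] at h1
                  simp at h1 hl
                  omega
                rw [if_pos rfl]
                rw [if_neg (by simp)]
                simp only [List.append_nil, List.reverse_reverse]
                rw [ih t'' ((c :: List.takeWhile isLetterB t) :: acc) hlen]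
                rw [runsOf]
                simp [hd]
          · have hc' : isLetterB c = false := by simpa using hc
            have : cleanB (c :: t) = ' ' :: cleanB t := by simp [cleanB, hc']
            rw [this]
            show PySem.Chars.split₀.go (' ' :: cleanB t) [] acc = _
            rw [PySem.Chars.split₀.go]
            have hsp : PySem.Chars.isspace ' ' = true := by decide
            rw [hsp]
            simp only [List.isEmpty_nil]
            rw [ih t acc (by simp at hl; omega)]
            rw [runsOf]
            simp [hc']

-- ===== VERDICT (by name: the statement is the Claim_ definition above) =====
theorem str_to_short_word_set_spec : Claim_equal_str_to_short_word_set := by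
  intro s _
  show str_to_short_word_set s = str_to_short_word_set_alt s
  unfold str_to_short_word_set str_to_short_word_set_alt
  rw [main_loopA s.toList.length s.toList PySem.Set.empty (le_refl _)]
  show _ = (PySem.Chars.split₀ (cleanB s.toList)).foldl stepF PySem.Set.empty
  unfold PySem.Chars.split₀
  rw [go_clean s.toList.length s.toList [] (le_refl _)]
  simp
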